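-- pv_equiv track=rewrite | github.com/davmein0/programming_paradigms | homework05/question1.py | move_robot
-- ===== SOURCE A (Python) =====
-- def move_robot(n):
--     # Initialize position
--     x, y = 0, 0
--
--     # [up, right, down, left]
--     directions = [(0, 1), (1, 0), (0, -1), (-1, 0)]
--
--     # Stores List of positions, initialize with the origin
--     positions = [(x,y)]
--
--     # Simulate moving 'n' steps
--     for i in range(n):
--         # Rotate clockwise, i+1 = step size
--         direction = directions[i % 4]
--         dx, dy = direction
--         x += dx * (i + 1)
--         y += dy * (i + 1)
--         positions.append((x, y))
--
--     return positions
-- ===== SOURCE B (Python) =====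
-- def move_robot(n):
--     # Closed form: position after k steps from arithmetic-series sums,
--     # computed independently per index instead of running accumulation.
--     def pos(k):
--         r = (k + 2) // 4          # right-steps taken among indices < k (i % 4 == 1)
--         l = k // 4                # left-steps  (i % 4 == 3)
--         u = (k + 3) // 4          # up-steps    (i % 4 == 0)
--         d = (k + 1) // 4          # down-steps  (i % 4 == 2)
--         x = 2 * r * r - 2 * l * (l + 1)          # sum 2+6+...  minus sum 4+8+...
--         y = u * (2 * u - 1) - d * (2 * d + 1)    # sum 1+5+...  minus sum 3+7+...
--         return (x, y)
--     return [pos(k) for k in range(max(n, 0) + 1)]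
-- ===== Notes on version B (the rewrite author's own statement) =====
-- stated objective: alternative
-- what changed: Replaces the stepwise running (x,y) accumulation with an independent per-index closed-form position: for each k, x(k) and y(k) are computed from arithmetic-series sums of the right/left and up/down step magnitudes (quarter-turn counts obtained by floor division), and the list is built by a comprehension over range(max(n,0)+1).
import Mathlib
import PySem

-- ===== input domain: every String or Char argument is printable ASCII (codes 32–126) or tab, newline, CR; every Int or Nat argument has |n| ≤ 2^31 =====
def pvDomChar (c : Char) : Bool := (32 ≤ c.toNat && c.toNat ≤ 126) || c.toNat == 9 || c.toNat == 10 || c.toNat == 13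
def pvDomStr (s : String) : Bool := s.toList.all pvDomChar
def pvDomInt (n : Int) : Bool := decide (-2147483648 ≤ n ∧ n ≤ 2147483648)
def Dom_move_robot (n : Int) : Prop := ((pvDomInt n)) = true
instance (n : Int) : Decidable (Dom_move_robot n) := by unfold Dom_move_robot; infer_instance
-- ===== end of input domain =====

-- B replaces A's running (x,y) accumulation with an independent closed-form
-- position per index (arithmetic-series sums); alternative decomposition, same O(n) cost.

-- ===== PORT A =====
-- directions = [(0,1),(1,0),(0,-1),(-1,0)]
def pvDirections : List (Int × Int) := [(0, 1), (1, 0), (0, -1), (-1, 0)]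

-- loop body of A; directions[i % 4] always succeeds (0 ≤ i % 4 < 4), so getD's
-- default is never used.
def pvStepA (st : Int × Int × List (Int × Int)) (i : Int) : Int × Int × List (Int × Int) :=
  let direction := (PySem.List.pyGet? pvDirections (PySem.Int.mod i 4)).getD (0, 0)
  let x := st.1 + direction.1 * (i + 1)
  let y := st.2.1 + direction.2 * (i + 1)
  (x, y, st.2.2 ++ [(x, y)])

def move_robot (n : Int) : List (Int × Int) :=
  ((PySem.List.pyRange 0 n 1).foldl pvStepA (0, 0, [((0 : Int), (0 : Int))])).2.2

-- ===== PORT B =====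
-- closed-form position after k steps (B's helper pos)
def pvPos (k : Int) : Int × Int :=
  let r := PySem.Int.floordiv (k + 2) 4
  let l := PySem.Int.floordiv k 4
  let u := PySem.Int.floordiv (k + 3) 4
  let d := PySem.Int.floordiv (k + 1) 4
  (2 * r * r - 2 * l * (l + 1), u * (2 * u - 1) - d * (2 * d + 1))

def move_robot_alt (n : Int) : List (Int × Int) :=
  (PySem.List.pyRange 0 (max n 0 + 1) 1).map pvPos

-- ===== PRECONDITION & SPEC =====
def Spec_move_robot (n : Int) (out : List (Int × Int)) : Prop := out = move_robot_alt n
instance (n : Int) (out : List (Int × Int)) : Decidable (Spec_move_robot n out) := by unfold Spec_move_robot; infer_instance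

-- ===== CLAIM (what is proved, stated in full; the proofs are below) =====
def Claim_equal_move_robot : Prop := ∀ (n : Int), Dom_move_robot n → Spec_move_robot n (move_robot n)

-- ===== LEMMAS AND PROOFS =====

-- closed-form values of pvPos on each residue class mod 4
lemma pvPos_4q (q : Int) : pvPos (4 * q) = (-2 * q, -2 * q) := by
  unfold pvPos
  rw [PySem.Int.floordiv_eq_ediv_of_pos (by norm_num), PySem.Int.floordiv_eq_ediv_of_pos (by norm_num),
      PySem.Int.floordiv_eq_ediv_of_pos (by norm_num), PySem.Int.floordiv_eq_ediv_of_pos (by norm_num)]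
  have h1 : (4 * q + 2) / 4 = q := by omega
  have h2 : (4 * q) / 4 = q := by omega
  have h3 : (4 * q + 3) / 4 = q := by omega
  have h4 : (4 * q + 1) / 4 = q := by omega
  simp only [h1, h2, h3, h4, Prod.mk.injEq]
  constructor <;> ring

lemma pvPos_4q1 (q : Int) : pvPos (4 * q + 1) = (-2 * q, 2 * q + 1) := by
  unfold pvPos
  rw [PySem.Int.floordiv_eq_ediv_of_pos (by norm_num), PySem.Int.floordiv_eq_ediv_of_pos (by norm_num),
      PySem.Int.floordiv_eq_ediv_of_pos (by norm_num), PySem.Int.floordiv_eq_ediv_of_pos (by norm_num)]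
  have h1 : (4 * q + 1 + 2) / 4 = q := by omega
  have h2 : (4 * q + 1) / 4 = q := by omega
  have h3 : (4 * q + 1 + 3) / 4 = q + 1 := by omega
  have h4 : (4 * q + 1 + 1) / 4 = q := by omega
  simp only [h1, h2, h3, h4, Prod.mk.injEq]
  constructor <;> ring

lemma pvPos_4q2 (q : Int) : pvPos (4 * q + 2) = (2 * q + 2, 2 * q + 1) := by
  unfold pvPos
  rw [PySem.Int.floordiv_eq_ediv_of_pos (by norm_num), PySem.Int.floordiv_eq_ediv_of_pos (by norm_num),
      PySem.Int.floordiv_eq_ediv_of_pos (by norm_num), PySem.Int.floordiv_eq_ediv_of_pos (by norm_num)]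
  have h1 : (4 * q + 2 + 2) / 4 = q + 1 := by omega
  have h2 : (4 * q + 2) / 4 = q := by omega
  have h3 : (4 * q + 2 + 3) / 4 = q + 1 := by omega
  have h4 : (4 * q + 2 + 1) / 4 = q := by omega
  simp only [h1, h2, h3, h4, Prod.mk.injEq]
  constructor <;> ring

lemma pvPos_4q3 (q : Int) : pvPos (4 * q + 3) = (2 * q + 2, -2 * q - 2) := by
  unfold pvPos
  rw [PySem.Int.floordiv_eq_ediv_of_pos (by norm_num), PySem.Int.floordiv_eq_ediv_of_pos (by norm_num),
      PySem.Int.floordiv_eq_ediv_of_pos (by norm_num), PySem.Int.floordiv_eq_ediv_of_pos (by norm_num)]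
  have h1 : (4 * q + 3 + 2) / 4 = q + 1 := by omega
  have h2 : (4 * q + 3) / 4 = q := by omega
  have h3 : (4 * q + 3 + 3) / 4 = q + 1 := by omega
  have h4 : (4 * q + 3 + 1) / 4 = q + 1 := by omega
  simp only [h1, h2, h3, h4, Prod.mk.injEq]
  constructor <;> ring

-- one step of A's loop moves pvPos k to pvPos (k+1)
lemma pvPos_succ (k : Nat) :
    ((pvPos (k : Int)).1 + ((PySem.List.pyGet? pvDirections (PySem.Int.mod (k : Int) 4)).getD (0, 0)).1 * ((k : Int) + 1),
     (pvPos (k : Int)).2 + ((PySem.List.pyGet? pvDirections (PySem.Int.mod (k : Int) 4)).getD (0, 0)).2 * ((k : Int) + 1)) =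
      pvPos ((k : Int) + 1) := by
  obtain ⟨q, r, hr, hk⟩ : ∃ q r, r < 4 ∧ k = 4 * q + r := ⟨k / 4, k % 4, by omega, by omega⟩
  have hr4 : r = 0 ∨ r = 1 ∨ r = 2 ∨ r = 3 := by omega
  rcases hr4 with rfl | rfl | rfl | rfl
  · have hm : PySem.Int.mod (k : Int) 4 = 0 := by
      rw [PySem.Int.mod_eq_emod_of_pos (by norm_num)]; omega
    have hki : (k : Int) = 4 * (q : Int) := by omega
    have hd : (PySem.List.pyGet? pvDirections (0 : Int)).getD ((0 : Int), (0 : Int)) = ((0 : Int), (1 : Int)) := by decide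
    rw [hm, hd, hki, pvPos_4q, pvPos_4q1]
    simp only [Prod.mk.injEq]
    constructor <;> ring
  · have hm : PySem.Int.mod (k : Int) 4 = 1 := by
      rw [PySem.Int.mod_eq_emod_of_pos (by norm_num)]; omega
    have hki : (k : Int) = 4 * (q : Int) + 1 := by omega
    have hki' : (k : Int) + 1 = 4 * (q : Int) + 2 := by omega
    have hd : (PySem.List.pyGet? pvDirections (1 : Int)).getD ((0 : Int), (0 : Int)) = ((1 : Int), (0 : Int)) := by decide
    rw [hm, hd, hki', hki, pvPos_4q1, pvPos_4q2]
    simp only [Prod.mk.injEq]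
    constructor <;> ring
  · have hm : PySem.Int.mod (k : Int) 4 = 2 := by
      rw [PySem.Int.mod_eq_emod_of_pos (by norm_num)]; omega
    have hki : (k : Int) = 4 * (q : Int) + 2 := by omega
    have hki' : (k : Int) + 1 = 4 * (q : Int) + 3 := by omega
    have hd : (PySem.List.pyGet? pvDirections (2 : Int)).getD ((0 : Int), (0 : Int)) = ((0 : Int), (-1 : Int)) := by decide
    rw [hm, hd, hki', hki, pvPos_4q2, pvPos_4q3]
    simp only [Prod.mk.injEq]
    constructor <;> ring
  · have hm : PySem.Int.mod (k : Int) 4 = 3 := by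
      rw [PySem.Int.mod_eq_emod_of_pos (by norm_num)]; omega
    have hki : (k : Int) = 4 * (q : Int) + 3 := by omega
    have hki' : (k : Int) + 1 = 4 * ((q : Int) + 1) := by omega
    have hd : (PySem.List.pyGet? pvDirections (3 : Int)).getD ((0 : Int), (0 : Int)) = ((-1 : Int), (0 : Int)) := by decide
    rw [hm, hd, hki', hki, pvPos_4q3, pvPos_4q]
    simp only [Prod.mk.injEq]
    constructor <;> ring

-- loop invariant: after m steps A's state is (pvPos m, positions = map pvPos [0..m])
lemma pvInv (m : Nat) :
    (PySem.List.pyRange 0 (m : Int) 1).foldl pvStepA (0, 0, [((0 : Int), (0 : Int))]) =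
      ((pvPos m).1, (pvPos m).2, (PySem.List.pyRange 0 ((m : Int) + 1) 1).map pvPos) := by
  induction m with
  | zero => decide
  | succ m ih =>
    have hsplit : PySem.List.pyRange 0 ((m : Int) + 1) 1 =
        PySem.List.pyRange 0 (m : Int) 1 ++ [(m : Int)] :=
      PySem.List.pyRange_one_succ_right (by positivity)
    have hsplit2 : PySem.List.pyRange 0 ((m : Int) + 1 + 1) 1 =
        PySem.List.pyRange 0 ((m : Int) + 1) 1 ++ [((m : Int) + 1)] :=
      PySem.List.pyRange_one_succ_right (by positivity)
    push_cast
    rw [hsplit, List.foldl_append, ih, hsplit2, List.map_append]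
    simp only [List.foldl_cons, List.foldl_nil, List.map_cons, List.map_nil]
    simp only [pvStepA]
    rw [← pvPos_succ m]

-- ===== VERDICT (by name: the statement is the Claim_ definition above) =====
theorem move_robot_spec : Claim_equal_move_robot := by
  intro n _
  unfold Spec_move_robot move_robot move_robot_alt
  rcases (by omega : n ≤ 0 ∨ 0 < n) with hn | hn
  · rw [PySem.List.pyRange_one_eq_nil hn, max_eq_right hn]
    decide
  · have hmax : max n 0 = n := max_eq_left hn.le
    rw [hmax]
    obtain ⟨m, rfl⟩ : ∃ m : Nat, n = (m : Int) := ⟨n.toNat, by omega⟩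
    rw [pvInv m]
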